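-- pv_equiv track=rewrite | github.com/ShadowGabbo/PythonTutorial | Exercises/language.py | language
-- ===== SOURCE A (Python) =====
-- def language(string):
--     new=""
--     vowels = ["a","e","i","o","u"]
--     for char in string:
--         if not char in vowels:
--             new+=char+"o"+char
--         else:
--             new+=char
--     return new
-- ===== SOURCE B (Python) =====
-- def language(string):
--     table = {ord(c): c + "o" + c for c in set(string)
--              if c not in ("a", "e", "i", "o", "u")}
--     return string.translate(table)
-- ===== Notes on version B (the rewrite author's own statement) =====
-- stated objective: idiomatic
-- what changed: Replaces the explicit per-character string-concatenation loop by building a translation table over the distinct consonants of the string once and delegating the single pass to str.translate.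
import Mathlib
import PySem

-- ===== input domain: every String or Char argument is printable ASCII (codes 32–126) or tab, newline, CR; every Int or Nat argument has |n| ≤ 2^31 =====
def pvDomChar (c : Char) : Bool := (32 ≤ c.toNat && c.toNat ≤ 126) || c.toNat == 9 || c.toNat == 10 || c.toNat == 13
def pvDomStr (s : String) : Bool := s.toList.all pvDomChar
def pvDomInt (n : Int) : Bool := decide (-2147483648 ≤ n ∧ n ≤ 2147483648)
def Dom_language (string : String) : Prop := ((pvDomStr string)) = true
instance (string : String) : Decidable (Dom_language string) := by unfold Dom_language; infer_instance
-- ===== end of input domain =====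

-- B builds a translation table over the distinct consonants once and maps each char through it;
-- A concatenates per character. Equivalence of return values, total on all strings.

-- ===== PORT A =====
-- for char in string: if not char in vowels: new += char+"o"+char else: new += char
def language (string : String) : String :=
  let vowels : List Char := ['a', 'e', 'i', 'o', 'u']
  String.mk (string.toList.foldl
    (fun new char =>
      if ¬ (vowels.contains char = true) then new ++ [char, 'o', char]
      else new ++ [char]) [])

-- ===== PORT B =====
-- table = {ord(c): c+"o"+c for c in set(string) if c not in vowels}  (dict only looked up afterwards)
def langTable (string : String) : PySem.Dict Int (List Char) :=
  (PySem.Set.ofList string.toList).foldl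
    (fun d c =>
      if (['a', 'e', 'i', 'o', 'u'] : List Char).contains c then d
      else d.insert ((c.toNat : Int)) [c, 'o', c]) PySem.Dict.empty

-- return string.translate(table): each char is replaced by its table entry, or kept if absent
def language_alt (string : String) : String :=
  let table := langTable string
  String.mk (string.toList.flatMap (fun c => (table.get? ((c.toNat : Int))).getD [c]))

-- ===== PRECONDITION & SPEC =====
def Spec_language (string : String) (out : String) : Prop := out = language_alt string
instance (string : String) (out : String) : Decidable (Spec_language string out) := by unfold Spec_language; infer_instance

-- ===== CLAIM (what is proved, stated in full; the proofs are below) =====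
def Claim_equal_language : Prop := ∀ (string : String), Dom_language string → Spec_language string (language string)

-- ===== LEMMAS AND PROOFS =====

theorem char_toNat_int_inj (a c : Char) (h : ((a.toNat : Int)) = (c.toNat : Int)) : a = c := by
  have h2 : a.toNat = c.toNat := by exact_mod_cast h
  exact Char.ext (UInt32.toNat_inj.mp h2)

-- the table built by folding inserts over any list L answers get? on c's code by:
-- tripled form if c ∈ L and c is a consonant, otherwise d's answer
theorem langTable_get (L : List Char) (d : PySem.Dict Int (List Char)) (c : Char) :
    (L.foldl (fun d a =>
        if (['a', 'e', 'i', 'o', 'u'] : List Char).contains a then d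
        else d.insert ((a.toNat : Int)) [a, 'o', a]) d).get? ((c.toNat : Int)) =
      if c ∈ L ∧ (['a', 'e', 'i', 'o', 'u'] : List Char).contains c = false
      then some [c, 'o', c] else d.get? ((c.toNat : Int)) := by
  induction L generalizing d with
  | nil => rw [List.foldl_nil, if_neg (by simp)]
  | cons a L ih =>
    rw [List.foldl_cons]
    by_cases hmem : c ∈ L ∧ (['a', 'e', 'i', 'o', 'u'] : List Char).contains c = false
    · have hmem' : c ∈ a :: L ∧ (['a', 'e', 'i', 'o', 'u'] : List Char).contains c = false :=
        ⟨List.mem_cons_of_mem a hmem.1, hmem.2⟩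
      by_cases hv : (['a', 'e', 'i', 'o', 'u'] : List Char).contains a = true
      · rw [if_pos hv, ih, if_pos hmem, if_pos hmem']
      · rw [if_neg hv, ih, if_pos hmem, if_pos hmem']
    · by_cases hc : c = a
      · subst hc
        by_cases hv : (['a', 'e', 'i', 'o', 'u'] : List Char).contains c = true
        · rw [if_pos hv, ih, if_neg hmem,
            if_neg (fun h => by rw [hv] at h; exact Bool.noConfusion h.2)]
        · have hcf : (['a', 'e', 'i', 'o', 'u'] : List Char).contains c = false :=
            Bool.eq_false_iff.mpr hv
          rw [if_neg hv, ih, if_neg hmem, PySem.Dict.get?_insert,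
            if_pos rfl, if_pos ⟨List.mem_cons_self .., hcf⟩]
      · have hcons : ¬ (c ∈ a :: L ∧ (['a', 'e', 'i', 'o', 'u'] : List Char).contains c = false) :=
          fun ⟨h1, h2⟩ => hmem ⟨(List.mem_cons.mp h1).resolve_left hc, h2⟩
        by_cases hv : (['a', 'e', 'i', 'o', 'u'] : List Char).contains a = true
        · rw [if_pos hv, ih, if_neg hmem, if_neg hcons]
        · rw [if_neg hv, ih, if_neg hmem, PySem.Dict.get?_insert,
            if_neg (fun h => hc (char_toNat_int_inj c a h)), if_neg hcons]

theorem flatMap_congr_mem {α β : Type} (l : List α) (f g : α → List β)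
    (h : ∀ x ∈ l, f x = g x) : l.flatMap f = l.flatMap g := by
  induction l with
  | nil => rfl
  | cons a l ih =>
    simp only [List.flatMap_cons, h a (List.mem_cons_self ..),
      ih (fun x hx => h x (List.mem_cons_of_mem a hx))]

-- ===== VERDICT (by name: the statement is the Claim_ definition above) =====
theorem language_spec : Claim_equal_language := by
  intro string _
  unfold Spec_language language language_alt
  dsimp only
  congr 1
  have hA : (fun (new : List Char) char =>
      if ¬ ((['a','e','i','o','u'] : List Char).contains char = true) then new ++ [char, 'o', char]
      else new ++ [char]) =
      fun new char => new ++ (if ¬ ((['a','e','i','o','u'] : List Char).contains char = true)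
        then [char, 'o', char] else [char]) := by
    funext new char; split <;> rfl
  rw [hA, PySem.List.foldl_append_eq_flatMap, List.nil_append]
  apply flatMap_congr_mem
  intro c hc
  unfold langTable
  rw [langTable_get]
  by_cases hv : (['a','e','i','o','u'] : List Char).contains c = true
  · rw [if_neg (not_not_intro hv),
      if_neg (fun h => by rw [hv] at h; exact Bool.noConfusion h.2)]
    rfl
  · have hcf : (['a','e','i','o','u'] : List Char).contains c = false := Bool.eq_false_iff.mpr hv
    rw [if_pos hv, if_pos ⟨(PySem.Set.mem_ofList _ _).mpr hc, hcf⟩]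
    rfl
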